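-- pv_equiv track=rewrite | github.com/IronAdamant/Chisel | chisel/test_mapper.py | _dedupe_deps
-- ===== SOURCE A (Python) =====
-- def _dedupe_deps(deps):
--     """Remove duplicate dependencies, keeping the richest first occurrence.
--
--     Deduplicates by (name, dep_type) but prefers entries that have a
--     ``module_path``. This ensures distinct imports with the same local
--     name (e.g. ``from a import foo`` and ``from b import foo``) are
--     preserved, while fallback entries without ``module_path`` are dropped
--     when a path-aware entry already exists.
--     """
--     by_key: dict[tuple[str, str], dict] = {}
--     for dep in deps:
--         key = (dep["name"], dep["dep_type"])
--         existing = by_key.get(key)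
--         if existing is None:
--             by_key[key] = dep
--         elif not existing.get("module_path") and dep.get("module_path"):
--             # Prefer the later entry if it carries path information
--             by_key[key] = dep
--     return list(by_key.values())
-- ===== SOURCE B (Python) =====
-- def _dedupe_deps(deps):
--     """Two-pass dedupe: pick the first path-aware entry per (name, dep_type)
--     key, then emit one entry per key at its first occurrence."""
--     deps = list(deps)
--     best = {}
--     for dep in deps:
--         key = (dep["name"], dep["dep_type"])
--         if key not in best and dep.get("module_path"):
--             best[key] = dep
--     out = []
--     seen = set()
--     for dep in deps:
--         key = (dep["name"], dep["dep_type"])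
--         if key not in seen:
--             seen.add(key)
--             out.append(best.get(key, dep))
--     return out
-- ===== Notes on version B (the rewrite author's own statement) =====
-- stated objective: alternative
-- what changed: Replaces the single-pass dict that upgrades an entry in place when a later path-aware duplicate arrives with two independent passes: one pass records the first path-aware entry per (name, dep_type) key, a second pass emits, at each key's first occurrence, that recorded entry or else the first occurrence itself.
import Mathlib
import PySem

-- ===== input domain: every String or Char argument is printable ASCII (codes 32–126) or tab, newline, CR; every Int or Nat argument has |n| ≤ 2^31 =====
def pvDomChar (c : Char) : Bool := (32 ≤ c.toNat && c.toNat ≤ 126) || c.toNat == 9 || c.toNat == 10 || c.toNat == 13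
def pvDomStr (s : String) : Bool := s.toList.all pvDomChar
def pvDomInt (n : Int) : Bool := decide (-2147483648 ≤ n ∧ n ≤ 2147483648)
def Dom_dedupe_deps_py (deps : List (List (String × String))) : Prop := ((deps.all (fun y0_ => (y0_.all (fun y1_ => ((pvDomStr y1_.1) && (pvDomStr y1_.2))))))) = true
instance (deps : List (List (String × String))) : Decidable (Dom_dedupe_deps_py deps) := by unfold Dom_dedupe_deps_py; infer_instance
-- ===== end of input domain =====

-- B replaces A's upgrade-in-place dict with two independent passes (first path-aware
-- entry per key, then emit at first occurrences); objective: alternative decomposition.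


-- shared vocabulary of both Pythons: key = (dep["name"], dep["dep_type"]) and the
-- truthiness of dep.get("module_path").  Pre_ guarantees both keys are present, so the
-- getD defaults are never consulted on admitted inputs.
def pvKey (dep : List (String × String)) : String × String :=
  ((PySem.Dict.mk dep).getD "name" "", (PySem.Dict.mk dep).getD "dep_type" "")

def pvHasPath (dep : List (String × String)) : Bool :=
  match (PySem.Dict.mk dep).get? "module_path" with
  | some s => s ≠ ""
  | none => false

-- ===== PORT A =====
def dedupe_deps_py (deps : List (List (String × String))) : List (List (String × String)) :=
  (deps.foldl (fun byKey dep =>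
      match byKey.get? (pvKey dep) with
      | none => byKey.insert (pvKey dep) dep
      | some existing =>
          if !pvHasPath existing && pvHasPath dep then byKey.insert (pvKey dep) dep
          else byKey)
    (PySem.Dict.empty : PySem.Dict (String × String) (List (String × String)))).values

-- ===== PORT B =====
def dedupe_deps_py_alt (deps : List (List (String × String))) : List (List (String × String)) :=
  let best := deps.foldl (fun b dep =>
      if !b.contains (pvKey dep) && pvHasPath dep then b.insert (pvKey dep) dep else b)
    (PySem.Dict.empty : PySem.Dict (String × String) (List (String × String)))
  (deps.foldl (fun (acc : List (List (String × String)) × PySem.Set (String × String)) dep =>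
      if PySem.Set.contains acc.2 (pvKey dep) then acc
      else (acc.1 ++ [best.getD (pvKey dep) dep], PySem.Set.add acc.2 (pvKey dep)))
    ([], PySem.Set.empty)).1

-- ===== PRECONDITION & SPEC =====
-- Pre_ excludes exactly the inputs where some dep lacks a "name" or "dep_type" key:
-- there Python A (and Python B alike) raises KeyError.
def Pre_dedupe_deps_py (deps : List (List (String × String))) : Prop :=
  ∀ dep ∈ deps, (PySem.Dict.mk dep).contains "name" = true ∧
                (PySem.Dict.mk dep).contains "dep_type" = true
instance (deps : List (List (String × String))) : Decidable (Pre_dedupe_deps_py deps) := by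
  unfold Pre_dedupe_deps_py; infer_instance

def pvWitness_dedupe_deps_py : (List (List (String × String))) :=
  [[("name", "foo"), ("dep_type", "import"), ("module_path", "a/b.py")],
   [("name", "foo"), ("dep_type", "import")]]

def Spec_dedupe_deps_py (deps : List (List (String × String))) (out : List (List (String × String))) : Prop := out = dedupe_deps_py_alt deps
instance (deps : List (List (String × String))) (out : List (List (String × String))) : Decidable (Spec_dedupe_deps_py deps out) := by unfold Spec_dedupe_deps_py; infer_instance

-- ===== CLAIM (what is proved, stated in full; the proofs are below) =====
def Claim_equal_dedupe_deps_py : Prop := ∀ (deps : List (List (String × String))), Dom_dedupe_deps_py deps → Pre_dedupe_deps_py deps → Spec_dedupe_deps_py deps (dedupe_deps_py deps)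

-- ===== LEMMAS AND PROOFS =====

-- first element of l whose key is k and which carries a truthy module_path
def pvFirstPath (l : List (List (String × String))) (k : String × String) :
    Option (List (String × String)) :=
  l.find? (fun d => pvKey d == k && pvHasPath d)

-- first element of l whose key is k (default [] is never exposed for keys that occur)
def pvFirstAnyD (l : List (List (String × String))) (k : String × String) :
    List (String × String) :=
  (l.find? (fun d => pvKey d == k)).getD []

-- the value both programs keep for key k
def pvVal (l : List (List (String × String))) (k : String × String) :
    List (String × String) :=
  (pvFirstPath l k).getD (pvFirstAnyD l k)

-- first-occurrence list of keys
def pvKeys (l : List (List (String × String))) : List (String × String) :=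
  PySem.Set.ofList (l.map pvKey)

theorem pvKeys_append (l : List (List (String × String))) (d : List (String × String)) :
    pvKeys (l ++ [d]) = PySem.Set.add (pvKeys l) (pvKey d) := by
  simp [pvKeys, PySem.Set.ofList_append_singleton]

theorem pvMem_pvKeys_iff (l : List (List (String × String))) (k : String × String) :
    k ∈ pvKeys l ↔ (l.find? (fun d => pvKey d == k)) ≠ none := by
  simp [pvKeys, PySem.Set.mem_ofList, List.find?_eq_none]

theorem pvFirstPath_append (l : List (List (String × String))) (d : List (String × String))
    (k : String × String) :
    pvFirstPath (l ++ [d]) k =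
      (pvFirstPath l k).or (if pvKey d = k ∧ pvHasPath d then some d else none) := by
  unfold pvFirstPath
  rw [List.find?_append]
  cases h : l.find? (fun d => pvKey d == k && pvHasPath d) with
  | some e => simp
  | none =>
      by_cases hk : pvKey d = k
      · cases hp : pvHasPath d <;> simp [List.find?, hk, hp]
      · have hb : (pvKey d == k) = false := by simpa using hk
        simp [List.find?, hb]
        exact fun h' => absurd h' hk

theorem pvFirstAnyD_append_of_mem (l : List (List (String × String)))
    (d : List (String × String)) (k : String × String) (h : k ∈ pvKeys l) :
    pvFirstAnyD (l ++ [d]) k = pvFirstAnyD l k := by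
  rw [pvMem_pvKeys_iff] at h
  cases hf : l.find? (fun d => pvKey d == k) with
  | none => exact absurd hf h
  | some e => simp [pvFirstAnyD, List.find?_append, hf, Option.or]

theorem pvFirstAnyD_append_self (l : List (List (String × String)))
    (d : List (String × String)) (h : pvKey d ∉ pvKeys l) :
    pvFirstAnyD (l ++ [d]) (pvKey d) = d := by
  rw [pvMem_pvKeys_iff] at h
  push Not at h
  simp [pvFirstAnyD, List.find?_append, h, Option.or, List.find?]

theorem pvVal_append_of_ne (l : List (List (String × String))) (d : List (String × String))
    (k : String × String) (hk : k ∈ pvKeys l) (hne : pvKey d ≠ k) :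
    pvVal (l ++ [d]) k = pvVal l k := by
  unfold pvVal
  rw [pvFirstPath_append, pvFirstAnyD_append_of_mem l d k hk]
  simp [hne]

-- get? of a dict whose items are a map over a Nodup key list
theorem get?_mk_map (ks : List (String × String))
    (f : String × String → List (String × String)) (hnd : ks.Nodup) (x : String × String) :
    (PySem.Dict.mk (ks.map (fun k => (k, f k)))).get? x =
      if x ∈ ks then some (f x) else none := by
  induction ks with
  | nil => simp [PySem.Dict.get?]
  | cons k ks ih =>
      simp only [List.map_cons, PySem.Dict.get?_mk_cons]
      rcases List.nodup_cons.mp hnd with ⟨hk, hnd'⟩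
      by_cases hx : k = x
      · subst hx; simp [hk]
      · simp only [beq_iff_eq, hx, if_false, ih hnd', List.mem_cons]
        by_cases hmem : x ∈ ks <;> simp [hmem, Ne.symm hx]

theorem pvKeys_nodup (l : List (List (String × String))) : (pvKeys l).Nodup :=
  PySem.Set.nodup_ofList _


theorem pvVal_append_of_path (l : List (List (String × String))) (d e : List (String × String))
    (k : String × String) (hfp : pvFirstPath l k = some e) :
    pvVal (l ++ [d]) k = pvVal l k := by
  unfold pvVal
  rw [pvFirstPath_append, hfp]
  simp

theorem pvVal_append_of_nopath_d (l : List (List (String × String))) (d : List (String × String))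
    (k : String × String) (hp : pvHasPath d = false) (hk : k ∈ pvKeys l) :
    pvVal (l ++ [d]) k = pvVal l k := by
  unfold pvVal
  rw [pvFirstPath_append, pvFirstAnyD_append_of_mem l d k hk]
  simp [hp]

theorem pvHasPath_of_firstPath_some (l : List (List (String × String)))
    (e : List (String × String)) (k : String × String) (hfp : pvFirstPath l k = some e) :
    pvHasPath e = true := by
  have := List.find?_some hfp
  simp [Bool.and_eq_true] at this
  exact this.2

theorem pvFirstPath_eq_none_of_not_mem (l : List (List (String × String)))
    (k : String × String) (hm : k ∉ pvKeys l) : pvFirstPath l k = none := by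
  rw [pvFirstPath, List.find?_eq_none]
  intro x hx hpx
  simp [Bool.and_eq_true] at hpx
  refine hm ((pvMem_pvKeys_iff l k).mpr (fun hnone => ?_))
  rw [List.find?_eq_none] at hnone
  have := hnone x hx
  simp [hpx.1] at this

theorem pvHasPath_firstAnyD_false (l : List (List (String × String))) (k : String × String)
    (hfp : pvFirstPath l k = none) (hm : k ∈ pvKeys l) :
    pvHasPath (pvFirstAnyD l k) = false := by
  rw [pvMem_pvKeys_iff] at hm
  cases hf : l.find? (fun d => pvKey d == k) with
  | none => exact absurd hf hm
  | some a =>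
      have ha : a ∈ l := List.mem_of_find?_eq_some hf
      rw [pvFirstPath, List.find?_eq_none] at hfp
      have := hfp a ha
      have hka := List.find?_some hf
      simp at hka this
      simp [pvFirstAnyD, hf]
      exact this hka

-- ===== characterisation of port A's fold =====
def pvAfold (l : List (List (String × String))) :
    PySem.Dict (String × String) (List (String × String)) :=
  l.foldl (fun byKey dep =>
      match byKey.get? (pvKey dep) with
      | none => byKey.insert (pvKey dep) dep
      | some existing =>
          if !pvHasPath existing && pvHasPath dep then byKey.insert (pvKey dep) dep
          else byKey)
    PySem.Dict.empty

theorem pvAfold_items (l : List (List (String × String))) :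
    (pvAfold l).items = (pvKeys l).map (fun k => (k, pvVal l k)) := by
  induction l using List.reverseRecOn with
  | nil => simp [pvAfold, pvKeys, PySem.Set.ofList_nil, PySem.Dict.empty]
  | append_singleton l d ih =>
      rw [pvAfold, List.foldl_append, List.foldl_cons, List.foldl_nil, ← pvAfold]
      have hD : pvAfold l = PySem.Dict.mk ((pvKeys l).map (fun k => (k, pvVal l k))) :=
        PySem.Dict.ext (by rw [ih])
      have hget : ∀ x, (pvAfold l).get? x =
          if x ∈ pvKeys l then some (pvVal l x) else none := fun x => by
        rw [hD, get?_mk_map _ _ (pvKeys_nodup l) x]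
      by_cases hm : pvKey d ∈ pvKeys l
      · rw [pvKeys_append, PySem.Set.add_of_mem hm]
        simp only [hget (pvKey d), if_pos hm]
        cases hfp : pvFirstPath l (pvKey d) with
        | some e =>
            have he : pvHasPath (pvVal l (pvKey d)) = true := by
              unfold pvVal; rw [hfp]
              exact pvHasPath_of_firstPath_some l e (pvKey d) hfp
            rw [show (!pvHasPath (pvVal l (pvKey d)) && pvHasPath d) = false by
              rw [he]; rfl]
            simp only [Bool.false_eq_true, if_false, ih]
            refine List.map_congr_left fun k hk => ?_
            by_cases hkk : k = pvKey d
            · subst hkk; rw [pvVal_append_of_path l d e (pvKey d) hfp]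
            · rw [pvVal_append_of_ne l d k hk (fun h => hkk h.symm)]
        | none =>
            cases hp : pvHasPath d with
            | false =>
                rw [show (!pvHasPath (pvVal l (pvKey d)) && false) = false by simp]
                simp only [Bool.false_eq_true, if_false, ih]
                refine List.map_congr_left fun k hk => ?_
                by_cases hkk : k = pvKey d
                · subst hkk; rw [pvVal_append_of_nopath_d l d (pvKey d) hp hk]
                · rw [pvVal_append_of_ne l d k hk (fun h => hkk h.symm)]
            | true =>
                have hex : pvHasPath (pvVal l (pvKey d)) = false := by
                  unfold pvVal; rw [hfp]
                  simpa using pvHasPath_firstAnyD_false l (pvKey d) hfp hm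
                rw [show (!pvHasPath (pvVal l (pvKey d)) && true) = true by
                  rw [hex]; rfl, if_pos rfl]
                have hcon : (pvAfold l).contains (pvKey d) = true := by
                  rw [PySem.Dict.contains_eq_isSome_get?, hget (pvKey d), if_pos hm]; rfl
                rw [PySem.Dict.items_insert_of_contains _ _ hcon, ih, List.map_map]
                refine List.map_congr_left fun k hk => ?_
                simp only [Function.comp]
                by_cases hkk : k = pvKey d
                · subst hkk
                  simp only [beq_self_eq_true, if_pos]
                  have : pvVal (l ++ [d]) (pvKey d) = d := by
                    unfold pvVal
                    rw [pvFirstPath_append, hfp]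
                    simp [hp]
                  rw [this]
                · have hb : (k == pvKey d) = false := by simpa using hkk
                  simp only [hb, Bool.false_eq_true, if_false]
                  rw [pvVal_append_of_ne l d k hk (fun h => hkk h.symm)]
      · rw [pvKeys_append, PySem.Set.add_of_not_mem hm]
        simp only [hget (pvKey d), if_neg hm]
        have hcon : (pvAfold l).contains (pvKey d) = false := by
          rw [PySem.Dict.contains_eq_isSome_get?, hget (pvKey d), if_neg hm]; rfl
        rw [PySem.Dict.items_insert_of_not_contains _ _ hcon, ih, List.map_append]
        congr 1
        · refine List.map_congr_left fun k hk => ?_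
          have hkk : pvKey d ≠ k := fun h => hm (h ▸ hk)
          rw [pvVal_append_of_ne l d k hk hkk]
        · have : pvVal (l ++ [d]) (pvKey d) = d := by
            unfold pvVal
            rw [pvFirstPath_append, pvFirstPath_eq_none_of_not_mem l (pvKey d) hm]
            cases hp : pvHasPath d with
            | true => simp
            | false => simp [pvFirstAnyD_append_self l d hm]
          simp [this]

-- ===== characterisation of port B's folds =====
theorem pvBest_get? (l : List (List (String × String))) (k : String × String) :
    (l.foldl (fun b dep =>
        if !b.contains (pvKey dep) && pvHasPath dep then b.insert (pvKey dep) dep else b)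
      (PySem.Dict.empty : PySem.Dict (String × String) (List (String × String)))).get? k =
      pvFirstPath l k := by
  induction l using List.reverseRecOn generalizing k with
  | nil => simp [pvFirstPath, PySem.Dict.get?_empty, List.find?]
  | append_singleton l d ih =>
      rw [List.foldl_append, List.foldl_cons, List.foldl_nil, pvFirstPath_append]
      set B := l.foldl (fun b dep =>
          if !b.contains (pvKey dep) && pvHasPath dep then b.insert (pvKey dep) dep else b)
        (PySem.Dict.empty : PySem.Dict (String × String) (List (String × String))) with hB
      have hcon : B.contains (pvKey d) = (pvFirstPath l (pvKey d)).isSome := by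
        rw [PySem.Dict.contains_eq_isSome_get?, ih]
      cases hp : pvHasPath d with
      | false => simp [ih]
      | true =>
          cases hf : pvFirstPath l (pvKey d) with
          | some e =>
              rw [show (!B.contains (pvKey d) && true) = false by rw [hcon, hf]; rfl]
              simp only [Bool.false_eq_true, if_false, ih]
              by_cases hk : pvKey d = k
              · subst hk; simp [hf]
              · simp [hk]
          | none =>
              rw [show (!B.contains (pvKey d) && true) = true by rw [hcon, hf]; rfl,
                  if_pos rfl, PySem.Dict.get?_insert]
              by_cases hk : k = pvKey d
              · subst hk; simp [hf]
              · rw [if_neg hk, ih]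
                have h2 : pvKey d ≠ k := fun h => hk h.symm
                simp [h2]

theorem pvPass2 (best : PySem.Dict (String × String) (List (String × String)))
    (l : List (List (String × String))) :
    (l.foldl (fun (acc : List (List (String × String)) × PySem.Set (String × String)) dep =>
        if PySem.Set.contains acc.2 (pvKey dep) then acc
        else (acc.1 ++ [best.getD (pvKey dep) dep], PySem.Set.add acc.2 (pvKey dep)))
      ([], PySem.Set.empty)) =
      ((pvKeys l).map (fun k => best.getD k (pvFirstAnyD l k)), pvKeys l) := by
  induction l using List.reverseRecOn with
  | nil => simp [pvKeys, PySem.Set.ofList_nil]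
  | append_singleton l d ih =>
      rw [List.foldl_append, ih]
      simp only [List.foldl_cons, List.foldl_nil]
      by_cases hm : pvKey d ∈ pvKeys l
      · have hc : PySem.Set.contains (pvKeys l) (pvKey d) = true :=
          (PySem.Set.contains_iff _ _).mpr hm
        rw [if_pos hc, pvKeys_append, PySem.Set.add_of_mem hm]
        refine Prod.ext ?_ rfl
        exact List.map_congr_left (fun k hk => by
          rw [pvFirstAnyD_append_of_mem l d k hk])
      · have hc : ¬ (PySem.Set.contains (pvKeys l) (pvKey d) = true) := by
          simpa [PySem.Set.contains_iff] using hm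
        rw [if_neg hc, pvKeys_append, PySem.Set.add_of_not_mem hm]
        refine Prod.ext ?_ rfl
        simp only [List.map_append, List.map_cons, List.map_nil]
        congr 1
        · exact List.map_congr_left (fun k hk => by
            rw [pvFirstAnyD_append_of_mem l d k hk])
        · rw [pvFirstAnyD_append_self l d hm]

-- ===== VERDICT (by name: the statement is the Claim_ definition above) =====
theorem dedupe_deps_py_spec : Claim_equal_dedupe_deps_py := by
  intro deps _ _
  show dedupe_deps_py deps = dedupe_deps_py_alt deps
  have hA : dedupe_deps_py deps = (pvKeys deps).map (fun k => pvVal deps k) := by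
    show (pvAfold deps).values = _
    rw [show (pvAfold deps).values = (pvAfold deps).items.map Prod.snd from rfl,
        pvAfold_items]
    simp [List.map_map, Function.comp]
  have hB : dedupe_deps_py_alt deps = (pvKeys deps).map (fun k => pvVal deps k) := by
    show (deps.foldl (fun (acc : List (List (String × String)) × PySem.Set (String × String)) dep =>
        if PySem.Set.contains acc.2 (pvKey dep) then acc
        else (acc.1 ++ [(deps.foldl (fun b dep =>
              if !b.contains (pvKey dep) && pvHasPath dep then b.insert (pvKey dep) dep else b)
            (PySem.Dict.empty : PySem.Dict (String × String) (List (String × String)))).getD (pvKey dep) dep],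
          PySem.Set.add acc.2 (pvKey dep)))
      ([], PySem.Set.empty)).1 = _
    rw [pvPass2]
    refine List.map_congr_left (fun k hk => ?_)
    rw [PySem.Dict.getD_eq_get?_getD, pvBest_get?]
    rfl
  rw [hA, hB]
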